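-- pv_equiv track=rewrite | github.com/Yureka-Adhikari/Bitplay-1 | Binary analysis.py | set_bits
-- ===== SOURCE A (Python) =====
-- def set_bits(n):
--     ones = 0
--     zero = 0
--     while n:
--         if n & 1 == 1:
--             ones += 1
--         else:
--             zero += 1
--         n >>= 1
--     return ones, zero
-- ===== SOURCE B (Python) =====
-- def set_bits(n):
--     ones = bin(n).count('1')
--     return ones, n.bit_length() - ones
-- ===== Notes on version B (the rewrite author's own statement) =====
-- stated objective: idiomatic
-- what changed: Replaces the bit-by-bit shift-and-mask loop with Python's built-ins: ones = bin(n).count('1'), zeros = n.bit_length() - ones, no loop at all.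
import Mathlib
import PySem

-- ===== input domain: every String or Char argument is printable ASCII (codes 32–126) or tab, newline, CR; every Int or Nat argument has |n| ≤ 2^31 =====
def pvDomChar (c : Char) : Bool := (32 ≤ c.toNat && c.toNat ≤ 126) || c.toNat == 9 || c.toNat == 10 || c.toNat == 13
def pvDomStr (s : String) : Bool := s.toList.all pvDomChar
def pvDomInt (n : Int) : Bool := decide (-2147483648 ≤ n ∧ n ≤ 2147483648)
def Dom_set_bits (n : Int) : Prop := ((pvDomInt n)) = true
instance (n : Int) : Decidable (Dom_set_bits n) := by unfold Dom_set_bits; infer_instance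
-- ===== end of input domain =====

-- B replaces A's bit-by-bit shift-and-mask loop with bit_count/bit_length (idiomatic, loop-free).

-- ===== PORT A =====
-- n >> 1 for positive n, expressed over toNat (cited by the port's decreasing_by)
theorem pvShrOne (n : Int) (h : 0 < n) : (n >>> (1:Nat)) = ((n.toNat / 2 : Nat) : Int) := by
  rw [Int.shiftRight_eq_div_pow]
  omega

-- the while-loop; Python's A loops forever when n < 0, so that case (excluded by Pre_) just stops
def set_bits_go (n ones zero : Int) : Int × Int :=
  if _h : n ≤ 0 then (ones, zero)
  else if PySem.Int.band n 1 = 1 then set_bits_go (n >>> (1:Nat)) (ones + 1) zero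
  else set_bits_go (n >>> (1:Nat)) ones (zero + 1)
termination_by n.toNat
decreasing_by
  all_goals
    rw [pvShrOne n (by omega)]
    simp only [Int.toNat_natCast]
    omega

def set_bits (n : Int) : Int × Int := set_bits_go n 0 0

-- ===== PORT B =====
def set_bits_alt (n : Int) : Int × Int :=
  let ones : Int := (PySem.Int.bitCount n : Int)
  (ones, (PySem.Int.bitLength n : Int) - ones)

-- ===== PRECONDITION & SPEC =====
-- Pre_ excludes negative n, on which Python A's 'while n: n >>= 1' never terminates.
def Pre_set_bits (n : Int) : Prop := 0 ≤ n
instance (n : Int) : Decidable (Pre_set_bits n) := by unfold Pre_set_bits; infer_instance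
def pvWitness_set_bits : Int := 5

def Spec_set_bits (n : Int) (out : Int × Int) : Prop := out = set_bits_alt n
instance (n : Int) (out : Int × Int) : Decidable (Spec_set_bits n out) := by unfold Spec_set_bits; infer_instance

-- ===== CLAIM (what is proved, stated in full; the proofs are below) =====
def Claim_equal_set_bits : Prop := ∀ (n : Int), Dom_set_bits n → Pre_set_bits n → Spec_set_bits n (set_bits n)

-- ===== LEMMAS AND PROOFS =====
theorem set_bits_go_nat (m : Nat) : ∀ (ones zero : Int),
    set_bits_go (m : Int) ones zero =
      (ones + (PySem.Int.bitCount (m : Int) : Int),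
       zero + ((PySem.Int.bitLength (m : Int) : Int) - (PySem.Int.bitCount (m : Int) : Int))) := by
  induction m using Nat.strong_induction_on with
  | _ m ih =>
    intro ones zero
    rcases Nat.eq_zero_or_pos m with hm | hm
    · subst hm
      rw [set_bits_go]
      simp [PySem.Int.bitCount_zero, PySem.Int.bitLength_zero]
    · rw [set_bits_go]
      have hpos : ¬ ((m : Int) ≤ 0) := by exact_mod_cast not_le.mpr (by exact_mod_cast hm)
      have hband : PySem.Int.band (m : Int) 1 = ((m % 2 : Nat) : Int) := by
        rw [PySem.Int.band_one]; exact_mod_cast PySem.Int.mod_natCast m 2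
      have hshr : ((m : Int) >>> (1:Nat)) = ((m / 2 : Nat) : Int) := by
        rw [pvShrOne _ (by exact_mod_cast hm)]; simp
      have hc := PySem.Int.bitCount_natCast hm
      have hl := PySem.Int.bitLength_natCast hm
      rw [dif_neg hpos, hband, hshr]
      have ihh := ih (m / 2) (Nat.div_lt_self hm (by omega))
      by_cases hpar : m % 2 = 1
      · rw [if_pos (by rw [hpar]; rfl), ihh]
        rw [Prod.mk.injEq]
        constructor <;> (simp only [hc, hl, hpar]; push_cast; omega)
      · have hpar0 : m % 2 = 0 := by omega
        rw [if_neg (by rw [hpar0]; exact_mod_cast (by decide : (0:Int) ≠ 1)), ihh]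
        rw [Prod.mk.injEq]
        constructor <;> (simp only [hc, hl, hpar0]; push_cast; omega)

-- ===== VERDICT (by name: the statement is the Claim_ definition above) =====
theorem set_bits_spec : Claim_equal_set_bits := by
  intro n _ hpre
  have hpre' : 0 ≤ n := hpre
  unfold Spec_set_bits set_bits set_bits_alt
  have hn : n = ((n.toNat : Nat) : Int) := by omega
  rw [hn, set_bits_go_nat]
  simp
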